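-- pv_equiv track=rewrite | github.com/Agenta-AI/agenta | api/oss/src/core/embeds/utils.py | _find_snippet_tokens
-- ===== SOURCE A (Python) =====
-- from typing import Dict, Any, List, Set, Callable, Awaitable, Optional, Tuple
--
-- def _find_snippet_tokens(text: str) -> List[str]:
--     """
--     Find all @{{...}} snippet tokens in a string.
--
--     Returns list of token strings including the @{{...}} wrapper.
--     Stops at the first }} found after the opening @{{.
--     """
--     tokens = []
--     i = 0
--     while i < len(text):
--         if text[i : i + 3] == "@{{":
--             start = i
--             i += 3  # skip @{{
--             while i < len(text):
--                 if text[i : i + 2] == "}}":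
--                     i += 2  # skip }}
--                     tokens.append(text[start:i])
--                     break
--                 i += 1
--             # If loop ended without break (no closing }}), no token added
--         else:
--             i += 1
--     return tokens
-- ===== SOURCE B (Python) =====
-- import re
--
-- _SNIPPET_RE = re.compile(r"@\{\{.*?\}\}", re.DOTALL)
--
-- def _find_snippet_tokens(text):
--     return _SNIPPET_RE.findall(text)
-- ===== Notes on version B (the rewrite author's own statement) =====
-- stated objective: idiomatic
-- what changed: B replaces A's hand-written nested index loops with a single compiled-regex findall using a lazy quantifier (@\{\{.*?\}\} with DOTALL), which also runs much faster since the scan happens in the C regex engine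
import Mathlib
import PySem

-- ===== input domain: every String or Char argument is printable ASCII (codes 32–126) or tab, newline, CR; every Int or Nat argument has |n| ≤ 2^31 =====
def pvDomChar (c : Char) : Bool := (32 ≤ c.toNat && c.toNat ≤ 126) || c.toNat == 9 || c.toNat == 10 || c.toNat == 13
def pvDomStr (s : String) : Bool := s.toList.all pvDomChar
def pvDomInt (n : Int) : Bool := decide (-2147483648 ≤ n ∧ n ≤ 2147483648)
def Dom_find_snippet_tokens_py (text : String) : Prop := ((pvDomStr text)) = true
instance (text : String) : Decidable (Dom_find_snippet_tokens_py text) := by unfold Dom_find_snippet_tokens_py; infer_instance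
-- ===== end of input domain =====

-- B replaces A's hand-written nested index loops with a regex findall (lazy quantifier);
-- its Lean port below transcribes the regex engine's scan for this pattern. Same complexity; objective: idiomatic Python.

-- ===== PORT A =====
-- A's inner while loop: scan for "}}" (Python's `text[i:i+2] == "}}"`), carrying the token
-- chars seen so far in reverse; on success return the finished token and the remaining text,
-- on falling off the end return none (no token appended).
def pvAInner (acc : List Char) : List Char → Option (List Char) × List Char
  | '}' :: '}' :: rest => (some (acc.reverse ++ ['}', '}']), rest)
  | c :: rest => pvAInner (c :: acc) rest
  | [] => (none, [])

lemma pvAInner_snd_le (acc : List Char) (cs : List Char) :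
    (pvAInner acc cs).2.length ≤ cs.length := by
  fun_induction pvAInner acc cs <;> simp_all <;> omega

-- A's outer while loop: Python's `text[i:i+3] == "@{{"` check, else i += 1; tokens
-- accumulated by append, `text[start:i]` rebuilt from the carried characters.
def pvAOuter : List Char → List String → List String
  | '@' :: '{' :: '{' :: rest, toks =>
    (match h : pvAInner ['{', '{', '@'] rest with
     | (some tok, rest') => pvAOuter rest' (toks ++ [String.mk tok])
     | (none, _) => toks)
  | _ :: rest, toks => pvAOuter rest toks
  | [], toks => toks
termination_by cs _ => cs.length
decreasing_by
  · have hle := pvAInner_snd_le ['{', '{', '@'] rest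
    rw [h] at hle
    simp only [List.length_cons] at *
    omega
  · simp only [List.length_cons]; omega

def find_snippet_tokens_py (text : String) : List String :=
  pvAOuter text.toList []

-- ===== PORT B =====
-- Hand port of `re.findall(r"@\{\{.*?\}\}", text, re.DOTALL)` for this fixed pattern:
-- the engine scans left to right for a match start "@{{" (pvFindOpen), then the lazy
-- `.*?` takes the shortest extension ending in "}}" (pvFindClose, DOTALL: any char
-- allowed, including newlines), and resumes after the match. Exact on all inputs.
def pvFindOpen : List Char → Option (List Char)
  | '@' :: '{' :: '{' :: rest => some rest
  | _ :: rest => pvFindOpen rest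
  | [] => none

def pvFindClose : List Char → Option (List Char × List Char)
  | '}' :: '}' :: rest => some ([], rest)
  | c :: rest => (pvFindClose rest).map (fun pr => (c :: pr.1, pr.2))
  | [] => none

lemma pvFindOpen_lt (cs after : List Char) (h : pvFindOpen cs = some after) :
    after.length < cs.length := by
  fun_induction pvFindOpen cs generalizing after <;> simp_all <;> omega

lemma pvFindClose_lt (cs : List Char) (pr : List Char × List Char)
    (h : pvFindClose cs = some pr) : pr.2.length < cs.length := by
  fun_induction pvFindClose cs generalizing pr with
  | case1 rest => simp_all; subst h; simp
  | case2 c rest hx ih =>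
    simp_all
    obtain ⟨pr', r', h1, rfl⟩ := h
    have := ih _ _ h1
    simp; omega
  | case3 => simp_all

def pvBLoop (cs : List Char) : List String :=
  match hOpen : pvFindOpen cs with
  | none => []
  | some afterOpen =>
    match hClose : pvFindClose afterOpen with
    | none => []
    | some pr =>
      String.mk ('@' :: '{' :: '{' :: (pr.1 ++ ['}', '}'])) :: pvBLoop pr.2
termination_by cs.length
decreasing_by
  exact (pvFindClose_lt _ _ hClose).trans (pvFindOpen_lt _ _ hOpen)

def find_snippet_tokens_py_alt (text : String) : List String :=
  pvBLoop text.toList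

-- ===== PRECONDITION & SPEC =====
def Spec_find_snippet_tokens_py (text : String) (out : List String) : Prop := out = find_snippet_tokens_py_alt text
instance (text : String) (out : List String) : Decidable (Spec_find_snippet_tokens_py text out) := by unfold Spec_find_snippet_tokens_py; infer_instance

-- ===== CLAIM (what is proved, stated in full; the proofs are below) =====
def Claim_equal_find_snippet_tokens_py : Prop := ∀ (text : String), Dom_find_snippet_tokens_py text → Spec_find_snippet_tokens_py text (find_snippet_tokens_py text)

-- ===== LEMMAS AND PROOFS =====

-- conditional one-step equations for the pattern matches (the fallthrough arms)
lemma pvFindClose_cons (c : Char) (cs : List Char)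
    (hx : ¬ (c = '}' ∧ ∃ r, cs = '}' :: r)) :
    pvFindClose (c :: cs) = (pvFindClose cs).map (fun pr => (c :: pr.1, pr.2)) := by
  rw [pvFindClose.eq_def]; split <;> simp_all

lemma pvFindOpen_cons (c : Char) (cs : List Char)
    (hx : ¬ (c = '@' ∧ ∃ r, cs = '{' :: '{' :: r)) :
    pvFindOpen (c :: cs) = pvFindOpen cs := by
  rw [pvFindOpen.eq_def]; split <;> simp_all

lemma pvAOuter_cons (c : Char) (cs : List Char) (toks : List String)
    (hx : ¬ (c = '@' ∧ ∃ r, cs = '{' :: '{' :: r)) :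
    pvAOuter (c :: cs) toks = pvAOuter cs toks := by
  rw [pvAOuter.eq_def]; split <;> simp_all

-- A's inner loop computes exactly what B's "first }}" search computes.
lemma pvAInner_eq_findClose (acc cs : List Char) :
    pvAInner acc cs =
      (match pvFindClose cs with
       | some pr => (some (acc.reverse ++ pr.1 ++ ['}', '}']), pr.2)
       | none => (none, ([] : List Char))) := by
  fun_induction pvAInner acc cs with
  | case1 acc rest => simp [pvFindClose]
  | case2 acc c rest hx ih =>
    have hx' : ¬ (c = '}' ∧ ∃ r, rest = '}' :: r) := by
      rintro ⟨rfl, r, rfl⟩; exact hx r rfl rfl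
    rw [ih, pvFindClose_cons _ _ hx']
    cases pvFindClose rest <;> simp
  | case3 acc => simp [pvFindClose]

-- B's loop only looks at the text through pvFindOpen.
lemma pvBLoop_congr (cs cs' : List Char) (h : pvFindOpen cs = pvFindOpen cs') :
    pvBLoop cs = pvBLoop cs' := by
  rw [pvBLoop.eq_def, pvBLoop.eq_def, h]

-- main invariant: the outer loop with accumulator toks produces toks ++ (B's result)
lemma pvAOuter_eq (n : ℕ) : ∀ cs : List Char, cs.length ≤ n → ∀ toks : List String,
    pvAOuter cs toks = toks ++ pvBLoop cs := by
  induction n with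
  | zero =>
    intro cs hlen toks
    have : cs = [] := by cases cs <;> simp_all
    subst this
    rw [pvAOuter.eq_def, pvBLoop.eq_def]; simp [pvFindOpen]
  | succ n ih =>
    intro cs hlen toks
    cases cs with
    | nil => rw [pvAOuter.eq_def, pvBLoop.eq_def]; simp [pvFindOpen]
    | cons c rest =>
      by_cases hM : c = '@' ∧ ∃ r, rest = '{' :: '{' :: r
      · obtain ⟨rfl, r, rfl⟩ := hM
        have hOp : pvFindOpen ('@' :: '{' :: '{' :: r) = some r := rfl
        have hOut : pvAOuter ('@' :: '{' :: '{' :: r) toks =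
            (match pvAInner ['{', '{', '@'] r with
             | (some tok, rest') => pvAOuter rest' (toks ++ [String.mk tok])
             | (none, _) => toks) := by
          rw [pvAOuter.eq_def]
          split <;> simp_all
          · rename_i heq
            subst heq
            rcases hAI : pvAInner ['{', '{', '@'] r with ⟨ot, r2⟩
            cases ot <;> simp
          · rename_i hx heq
            exact (hx r heq.1.symm heq.2.symm).elim
        rw [hOut, pvBLoop.eq_def, hOp, pvAInner_eq_findClose]
        cases hc : pvFindClose r with
        | none =>
          split <;> simp_all
          split <;> simp_all
        | some pr =>
          have hlt : pr.2.length ≤ n := by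
            have := pvFindClose_lt r pr hc
            simp at hlen; omega
          simp only [hc]
          rw [ih pr.2 hlt]
          split <;> simp_all
      · rw [pvAOuter_cons _ _ _ hM, pvBLoop_congr _ rest (pvFindOpen_cons _ _ hM)]
        exact ih rest (by simp at hlen; omega) toks

-- ===== VERDICT (by name: the statement is the Claim_ definition above) =====
theorem find_snippet_tokens_py_spec : Claim_equal_find_snippet_tokens_py := by
  intro text _
  unfold Spec_find_snippet_tokens_py find_snippet_tokens_py find_snippet_tokens_py_alt
  simpa using pvAOuter_eq text.toList.length text.toList le_rfl []
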